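-- pv_equiv track=rewrite | github.com/Andy963/ads | ads/cli/slash.py | _normalize_command_refs
-- ===== SOURCE A (Python) =====
-- def _normalize_command_refs(text: str) -> str:
--     """Replace slash-style references with CLI command names."""
--     if not text:
--         return text
--
--     replacements = {
--         "/ads.new": "ads.new",
--         "/ads.status": "ads.status",
--         "/ads.add": "ads.add",
--         "/ads.commit": "ads.commit",
--         "/ads.checkout": "ads.checkout",
--         "/ads.branch": "ads.branch",
--         "/ads.log": "ads.log",
--         "/ads.get": "ads.get",
--         "/ads.commands": "ads.commands",
--         "/ads.run": "ads.run",
--     }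
--     for src, dest in replacements.items():
--         text = text.replace(src, dest)
--     return text
-- ===== SOURCE B (Python) =====
-- def _normalize_command_refs(text: str) -> str:
--     """Replace slash-style references with CLI command names."""
--     names = ("ads.new", "ads.status", "ads.add", "ads.commit", "ads.checkout",
--              "ads.branch", "ads.log", "ads.get", "ads.commands", "ads.run")
--     return "".join(
--         "" if ch == "/" and text.startswith(names, i + 1) else ch
--         for i, ch in enumerate(text)
--     )
-- ===== Notes on version B (the rewrite author's own statement) =====
-- stated objective: alternative
-- what changed: Replaced A's ten sequential str.replace passes over the text by a single left-to-right scan that drops each slash standing directly before one of the ten known command names (one startswith check per position).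
import Mathlib
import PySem

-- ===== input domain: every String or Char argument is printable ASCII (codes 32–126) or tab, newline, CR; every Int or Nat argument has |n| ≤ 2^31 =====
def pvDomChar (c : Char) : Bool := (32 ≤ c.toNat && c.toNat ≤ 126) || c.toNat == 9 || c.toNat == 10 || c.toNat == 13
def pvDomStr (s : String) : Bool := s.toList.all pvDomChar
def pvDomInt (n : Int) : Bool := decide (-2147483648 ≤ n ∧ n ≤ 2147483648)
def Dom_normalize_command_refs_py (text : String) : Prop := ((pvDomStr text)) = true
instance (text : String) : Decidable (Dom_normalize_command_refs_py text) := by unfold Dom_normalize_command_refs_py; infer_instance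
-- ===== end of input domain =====

-- B replaces A's ten sequential str.replace passes by one left-to-right scan that drops each slash
-- standing directly before a known command name (objective: alternative single-pass algorithm).

-- ===== PORT A =====
-- the dict literal of A, as an association list in insertion order
def pvReplacements : List (String × String) :=
  [("/ads.new", "ads.new"), ("/ads.status", "ads.status"), ("/ads.add", "ads.add"),
   ("/ads.commit", "ads.commit"), ("/ads.checkout", "ads.checkout"), ("/ads.branch", "ads.branch"),
   ("/ads.log", "ads.log"), ("/ads.get", "ads.get"), ("/ads.commands", "ads.commands"),
   ("/ads.run", "ads.run")]

def normalize_command_refs_py (text : String) : String :=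
  if text = "" then text
  else pvReplacements.foldl (fun t p => PySem.Str.replace t p.1 p.2) text

-- ===== PORT B =====
-- the tuple of command names in Source B
def pvNames : List (List Char) :=
  ["ads.new".toList, "ads.status".toList, "ads.add".toList, "ads.commit".toList,
   "ads.checkout".toList, "ads.branch".toList, "ads.log".toList, "ads.get".toList,
   "ads.commands".toList, "ads.run".toList]

-- the generator of Source B: each char together with the text after it; a '/' followed by one
-- of the names contributes "", every other char contributes itself
def pvScanK (K : List (List Char)) : List Char → List Char
  | [] => []
  | c :: t => if c == '/' && K.any (fun k => k.isPrefixOf t) then pvScanK K t else c :: pvScanK K t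

def normalize_command_refs_py_alt (text : String) : String :=
  String.ofList (pvScanK pvNames text.toList)

-- ===== PRECONDITION & SPEC =====
def Spec_normalize_command_refs_py (text : String) (out : String) : Prop := out = normalize_command_refs_py_alt text
instance (text : String) (out : String) : Decidable (Spec_normalize_command_refs_py text out) := by unfold Spec_normalize_command_refs_py; infer_instance

-- ===== CLAIM (what is proved, stated in full; the proofs are below) =====
def Claim_equal_normalize_command_refs_py : Prop := ∀ (text : String), Dom_normalize_command_refs_py text → Spec_normalize_command_refs_py text (normalize_command_refs_py text)

-- ===== LEMMAS AND PROOFS =====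

-- a slash-free block is copied verbatim by the scan
theorem pvScanK_copy (K : List (List Char)) (u t : List Char) (hu : ∀ c ∈ u, c ≠ '/') :
    pvScanK K (u ++ t) = u ++ pvScanK K t := by
  induction u with
  | nil => rfl
  | cons c u ih =>
    have hc : (c == '/') = false := by
      simp [hu c (List.mem_cons_self ..)]
    simp [pvScanK, hc, ih fun x hx => hu x (List.mem_cons_of_mem _ hx)]

theorem pv_not_prefix_append {w k X : List Char} (h1 : ¬ w <+: k) (h2 : ¬ k <+: w) :
    ¬ w <+: k ++ X := by
  intro h
  by_cases hle : w.length ≤ k.length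
  · exact h1 (List.prefix_of_prefix_length_le h (k.prefix_append X) hle)
  · exact h2 (List.prefix_of_prefix_length_le (k.prefix_append X) h (by omega))

-- the scan never CREATES an occurrence of (a suffix of) b at the front
theorem pvScanK_no_create (K : List (List Char)) (b : List Char)
    (HK : ∀ k ∈ K, ∀ c ∈ k, c ≠ '/')
    (Hinc : ∀ k ∈ K, ∀ w ∈ b.tails, w ≠ [] → ¬ w <+: k ∧ ¬ k <+: w) :
    ∀ cs w, w <:+ b → ¬ w <+: cs → ¬ w <+: pvScanK K cs := by
  intro cs
  induction cs with
  | nil =>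
    intro w _ hcs hpre
    simp only [pvScanK] at hpre
    exact hcs (by simp [List.prefix_nil.mp hpre])
  | cons c t ih =>
    intro w hw hcs
    have hwne : w ≠ [] := by
      rintro rfl; exact hcs List.nil_prefix
    by_cases hcond : (c == '/' && K.any (fun k => k.isPrefixOf t)) = true
    · -- a slash before some key k is dropped; w cannot start inside k ++ …
      have hany := (Bool.and_eq_true ..).mp hcond |>.2
      obtain ⟨k, hkK, hkp⟩ := List.any_eq_true.mp hany
      have hkpre : k <+: t := (PySem.Chars.startswith_iff t k).mp hkp
      obtain ⟨t₂, rfl⟩ := hkpre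
      have hinc := Hinc k hkK w ((List.mem_tails w b).mpr hw) hwne
      simp only [pvScanK, hcond, if_true]
      rw [pvScanK_copy K k t₂ (HK k hkK)]
      exact pv_not_prefix_append hinc.1 hinc.2
    · simp only [pvScanK, hcond, if_false, Bool.false_eq_true]
      intro hpre
      obtain ⟨w0, w', rfl⟩ : ∃ w0 w', w = w0 :: w' := by
        cases w with
        | nil => exact absurd rfl hwne
        | cons a l => exact ⟨a, l, rfl⟩
      have h0 : w0 = c := (List.cons_prefix_cons.mp hpre).1
      subst h0
      have hw' : w' <+: pvScanK K t := (List.cons_prefix_cons.mp hpre).2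
      have hcs' : ¬ w' <+: t := fun h => hcs (List.cons_prefix_cons.mpr ⟨rfl, h⟩)
      have hw'b : w' <:+ b := List.IsSuffix.trans (List.suffix_cons w0 w') hw
      exact ih w' hw'b hcs' hw'

-- str.replace(text, '/'+b, b) IS the single-key scan (b slash-free, nonempty)
theorem pvReplaceGo (b : List Char) (hb : ∀ c ∈ b, c ≠ '/') (hbne : b ≠ []) :
    ∀ fuel l acc, l.length ≤ fuel →
      PySem.Chars.replace.go ('/'::b) b fuel l acc = acc.reverse ++ pvScanK [b] l := by
  intro fuel
  induction fuel with
  | zero =>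
    intro l acc hl
    have : l = [] := List.eq_nil_of_length_eq_zero (by omega)
    subst this
    simp [PySem.Chars.replace.go, pvScanK]
  | succ fuel ih =>
    intro l acc hl
    cases l with
    | nil => simp [PySem.Chars.replace.go, pvScanK]
    | cons c t =>
      by_cases h : ('/'::b).isPrefixOf (c::t) = true
      · have hpre : ('/'::b) <+: (c::t) := (PySem.Chars.startswith_iff _ _).mp h
        have hc : c = '/' := (List.cons_prefix_cons.mp hpre).1.symm
        have hbt : b <+: t := (List.cons_prefix_cons.mp hpre).2
        obtain ⟨t₂, rfl⟩ := hbt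
        have hlen : t₂.length ≤ fuel := by
          have hb1 : 1 ≤ b.length := List.length_pos_iff.mpr hbne
          simp only [List.length_cons, List.length_append] at hl; omega
        have hdrop : (c :: (b ++ t₂)).drop ('/'::b).length = t₂ := by
          simp
        rw [PySem.Chars.replace.go]
        simp only [h, if_true, hdrop]
        rw [ih t₂ (b.reverse ++ acc) hlen]
        have hscan : pvScanK [b] (c :: (b ++ t₂)) = b ++ pvScanK [b] t₂ := by
          have hcond : (c == '/' && [b].any (fun k => k.isPrefixOf (b ++ t₂))) = true := by
            simp [hc, List.isPrefixOf_iff_prefix]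
          simp only [pvScanK, hcond, if_true]
          exact pvScanK_copy [b] b t₂ hb
        rw [hscan]
        simp
      · rw [PySem.Chars.replace.go]
        simp only [h, if_false, Bool.false_eq_true]
        rw [ih t (c :: acc) (by simpa using Nat.le_of_succ_le_succ hl)]
        have hcond : (c == '/' && [b].any (fun k => k.isPrefixOf t)) = false := by
          cases hcb : (c == '/') with
          | false => simp
          | true =>
            have hc' : c = '/' := by simpa using hcb
            subst hc'
            have hbt : ¬ b <+: t := by
              intro hbb
              exact h (by
                simp only [List.isPrefixOf_iff_prefix]
                exact List.cons_prefix_cons.mpr ⟨rfl, hbb⟩)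
            have hpf : b.isPrefixOf t = false := by
              rw [Bool.eq_false_iff]
              simpa [List.isPrefixOf_iff_prefix] using hbt
            simp [hpf]
        have hstep : pvScanK [b] (c :: t) = c :: pvScanK [b] t := by
          simp only [pvScanK, hcond, if_false, Bool.false_eq_true]
        rw [hstep]
        simp

theorem pvReplace_eq_scan1 (b : List Char) (hb : ∀ c ∈ b, c ≠ '/') (hbne : b ≠ []) (s : List Char) :
    PySem.Chars.replace s ('/'::b) b = pvScanK [b] s := by
  rw [PySem.Chars.replace]
  simp only [List.isEmpty_cons, if_false, Bool.false_eq_true]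
  simpa using pvReplaceGo b hb hbne s.length s [] (le_refl _)

-- composing one more single-key scan after a multi-key scan = the multi-key scan with the key added
theorem pvScanK_compose (K : List (List Char)) (b : List Char)
    (hb : ∀ c ∈ b, c ≠ '/')
    (HK : ∀ k ∈ K, ∀ c ∈ k, c ≠ '/')
    (Hinc : ∀ k ∈ K, ∀ w ∈ b.tails, w ≠ [] → ¬ w <+: k ∧ ¬ k <+: w) :
    ∀ cs, pvScanK [b] (pvScanK K cs) = pvScanK (K ++ [b]) cs := by
  have main : ∀ n cs, cs.length ≤ n → pvScanK [b] (pvScanK K cs) = pvScanK (K ++ [b]) cs := by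
    intro n
    induction n with
    | zero =>
      intro cs hcs
      have : cs = [] := List.eq_nil_of_length_eq_zero (by omega)
      subst this; rfl
    | succ n ih =>
      intro cs hcs
      cases cs with
      | nil => rfl
      | cons c t =>
        have ht : t.length ≤ n := by simpa using Nat.le_of_succ_le_succ hcs
        by_cases hc : (c == '/') = true
        · by_cases hK : (K.any (fun k => k.isPrefixOf t)) = true
          · have h1 : (c == '/' && K.any (fun k => k.isPrefixOf t)) = true := by simp [hc, hK]
            have h2 : (c == '/' && (K ++ [b]).any (fun k => k.isPrefixOf t)) = true := by
              simp only [List.any_append]; simp [hc, hK]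
            simp only [pvScanK, h1, h2, if_true]
            exact ih t ht
          · by_cases hbp : (b.isPrefixOf t) = true
            · obtain ⟨t₂, rfl⟩ := List.isPrefixOf_iff_prefix.mp hbp
              have h1 : (c == '/' && K.any (fun k => k.isPrefixOf (b ++ t₂))) = false := by
                simp [hK]
              have h2 : (c == '/' && (K ++ [b]).any (fun k => k.isPrefixOf (b ++ t₂))) = true := by
                simp only [List.any_append]
                simp [hc, List.isPrefixOf_iff_prefix]
              have ht₂ : t₂.length ≤ n := by
                simp only [List.length_append] at ht; omega
              simp only [pvScanK, h1, h2, if_true, if_false, Bool.false_eq_true]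
              rw [pvScanK_copy K b t₂ hb]
              have hcond : (c == '/' && [b].any (fun k => k.isPrefixOf (b ++ pvScanK K t₂))) = true := by
                simp [hc, List.isPrefixOf_iff_prefix]
              simp only [hcond, if_true]
              rw [pvScanK_copy [b] b (pvScanK K t₂) hb, ih t₂ ht₂,
                pvScanK_copy (K ++ [b]) b t₂ hb]
            · have h1 : (c == '/' && K.any (fun k => k.isPrefixOf t)) = false := by simp [hK]
              have h2 : (c == '/' && (K ++ [b]).any (fun k => k.isPrefixOf t)) = false := by
                simp only [List.any_append]
                simp [hK, hbp]
              have hnb : ¬ b <+: t := fun h => by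
                simp [List.isPrefixOf_iff_prefix.mpr h] at hbp
              have hnot : ¬ b <+: pvScanK K t :=
                pvScanK_no_create K b HK Hinc t b (List.suffix_refl b) hnb
              have hcond : (c == '/' && [b].any (fun k => k.isPrefixOf (pvScanK K t))) = false := by
                have hpf : b.isPrefixOf (pvScanK K t) = false := by
                  rw [Bool.eq_false_iff]
                  simpa [List.isPrefixOf_iff_prefix] using hnot
                simp [hpf]
              simp only [pvScanK, h1, h2, hcond, if_false, Bool.false_eq_true]
              rw [ih t ht]
        · have hc' : (c == '/') = false := by simpa using hc
          have h1 : (c == '/' && K.any (fun k => k.isPrefixOf t)) = false := by simp [hc']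
          have h2 : (c == '/' && (K ++ [b]).any (fun k => k.isPrefixOf t)) = false := by simp [hc']
          have h3 : (c == '/' && [b].any (fun k => k.isPrefixOf (pvScanK K t))) = false := by
            simp [hc']
          simp only [pvScanK, h1, h2, h3, if_false, Bool.false_eq_true]
          rw [ih t ht]
  exact fun cs => main cs.length cs (le_refl _)

-- the chain over all ten keys, on char lists
set_option maxRecDepth 4096 in
theorem pvFold_eq_scan (s : List Char) :
    (pvReplacements.foldl
      (fun l p => PySem.Chars.replace l p.1.toList p.2.toList) s) = pvScanK pvNames s := by
  simp only [pvReplacements, List.foldl_cons, List.foldl_nil]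
  rw [show ("/ads.new".toList) = '/' :: ("ads.new".toList) from rfl,
      pvReplace_eq_scan1 _ (by simp) (by simp),
      show ("/ads.status".toList) = '/' :: ("ads.status".toList) from rfl,
      pvReplace_eq_scan1 _ (by simp) (by simp),
      show ("/ads.add".toList) = '/' :: ("ads.add".toList) from rfl,
      pvReplace_eq_scan1 _ (by simp) (by simp),
      show ("/ads.commit".toList) = '/' :: ("ads.commit".toList) from rfl,
      pvReplace_eq_scan1 _ (by simp) (by simp),
      show ("/ads.checkout".toList) = '/' :: ("ads.checkout".toList) from rfl,
      pvReplace_eq_scan1 _ (by simp) (by simp),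
      show ("/ads.branch".toList) = '/' :: ("ads.branch".toList) from rfl,
      pvReplace_eq_scan1 _ (by simp) (by simp),
      show ("/ads.log".toList) = '/' :: ("ads.log".toList) from rfl,
      pvReplace_eq_scan1 _ (by simp) (by simp),
      show ("/ads.get".toList) = '/' :: ("ads.get".toList) from rfl,
      pvReplace_eq_scan1 _ (by simp) (by simp),
      show ("/ads.commands".toList) = '/' :: ("ads.commands".toList) from rfl,
      pvReplace_eq_scan1 _ (by simp) (by simp),
      show ("/ads.run".toList) = '/' :: ("ads.run".toList) from rfl,
      pvReplace_eq_scan1 _ (by simp) (by simp)]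
  rw [pvScanK_compose _ _ (by simp) (by simp) (by decide) s,
      pvScanK_compose _ _ (by simp) (by simp) (by decide) s,
      pvScanK_compose _ _ (by simp) (by simp) (by decide) s,
      pvScanK_compose _ _ (by simp) (by simp) (by decide) s,
      pvScanK_compose _ _ (by simp) (by simp) (by decide) s,
      pvScanK_compose _ _ (by simp) (by simp) (by decide) s,
      pvScanK_compose _ _ (by simp) (by simp) (by decide) s,
      pvScanK_compose _ _ (by simp) (by simp) (by decide) s,
      pvScanK_compose _ _ (by simp) (by simp) (by decide) s]
  rfl

-- lift the string-level foldl of A to char lists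
theorem pvFoldString (ps : List (String × String)) (t : String) :
    (ps.foldl (fun t p => PySem.Str.replace t p.1 p.2) t).toList =
      ps.foldl (fun l p => PySem.Chars.replace l p.1.toList p.2.toList) t.toList := by
  induction ps generalizing t with
  | nil => rfl
  | cons p ps ih =>
    simp only [List.foldl_cons, ih, PySem.Str.toList_replace]

-- ===== VERDICT (by name: the statement is the Claim_ definition above) =====
theorem normalize_command_refs_py_spec : Claim_equal_normalize_command_refs_py := by
  intro text _
  unfold Spec_normalize_command_refs_py normalize_command_refs_py normalize_command_refs_py_alt
  by_cases h : text = ""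
  · subst h; decide
  · simp only [h, if_false]
    have h2 := congrArg String.ofList ((pvFoldString pvReplacements text).trans (pvFold_eq_scan text.toList))
    rw [String.ofList_toList] at h2
    exact h2
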